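-- pv_equiv track=rewrite | github.com/kylin256/Treasure-Locator | main.py | filter_positions
-- ===== SOURCE A (Python) =====
-- from typing import List, Tuple
--
-- def filter_positions(
--         positions: List[List[Tuple[int, int]]],
--         has_treasure: List[List[int]],
--         no_treasure: List[List[int]]
-- ) -> List[List[Tuple[int, int]]]:
--     """根据用户输入过滤位置"""
--     filtered = []
--
--     # 转换为元组以便比较
--     has_treasure_tuples = [tuple(cell) for cell in has_treasure]
--     no_treasure_tuples = [tuple(cell) for cell in no_treasure]
--
--     for position in positions:
--         # 检查是否包含所有有宝藏的格子
--         has_all_treasure = all(cell in position for cell in has_treasure_tuples)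
--
--         # 检查是否不包含任何无宝藏的格子
--         has_no_treasure = all(cell not in position for cell in no_treasure_tuples)
--
--         if has_all_treasure and has_no_treasure:
--             filtered.append(position)
--
--     return filtered
-- ===== SOURCE B (Python) =====
-- def filter_positions(positions, has_treasure, no_treasure):
--     # Inverted index: map each cell to the set of indices of positions containing it,
--     # then intersect/subtract index sets instead of scanning every position per cell.
--     index = {}
--     for i, position in enumerate(positions):
--         for cell in position:
--             index.setdefault(cell, set()).add(i)
--     alive = set(range(len(positions)))
--     for cell in has_treasure:
--         alive &= index.get(tuple(cell), set())
--     for cell in no_treasure: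
--         alive -= index.get(tuple(cell), set())
--     return [positions[i] for i in sorted(alive)]
-- ===== Notes on version B (the rewrite author's own statement) =====
-- stated objective: alternative
-- what changed: Replaces A's per-position scan of every cell by an inverted index (cell -> set of position indices) built in one pass; the answer is the intersection of the has_treasure cells' index sets minus the union of the no_treasure cells' sets, emitted in ascending index order.
import Mathlib
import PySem

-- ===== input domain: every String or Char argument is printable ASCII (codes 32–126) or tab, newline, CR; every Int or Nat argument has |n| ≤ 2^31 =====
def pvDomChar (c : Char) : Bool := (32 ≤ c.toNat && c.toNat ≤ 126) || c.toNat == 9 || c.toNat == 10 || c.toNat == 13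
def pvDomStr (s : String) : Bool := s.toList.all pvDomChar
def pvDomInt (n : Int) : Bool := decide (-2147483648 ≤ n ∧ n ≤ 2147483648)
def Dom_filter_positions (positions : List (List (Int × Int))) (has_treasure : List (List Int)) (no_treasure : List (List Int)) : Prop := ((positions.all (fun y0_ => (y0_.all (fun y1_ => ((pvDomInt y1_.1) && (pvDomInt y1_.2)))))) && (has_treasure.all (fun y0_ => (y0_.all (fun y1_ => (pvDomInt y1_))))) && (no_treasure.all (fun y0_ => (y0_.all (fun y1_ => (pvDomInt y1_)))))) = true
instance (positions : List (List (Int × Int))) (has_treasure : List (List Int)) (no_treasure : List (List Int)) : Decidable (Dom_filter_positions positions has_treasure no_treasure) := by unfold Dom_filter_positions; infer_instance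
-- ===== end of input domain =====

-- B replaces A's per-position scan of every cell by an inverted index (cell -> set of
-- position indices), intersecting/subtracting index sets; objective: alternative.

-- ===== PORT A =====
-- `tuple(cell) in position`: the tuple of the cell list equals some (Int × Int) pair of
-- the position, i.e. the cell list is exactly [fst, snd] of that pair.
def cellInA (c : List Int) (p : List (Int × Int)) : Bool :=
  p.any (fun ab => c == [ab.1, ab.2])

def filter_positions (positions : List (List (Int × Int))) (has_treasure : List (List Int)) (no_treasure : List (List Int)) : List (List (Int × Int)) :=
  -- has_treasure_tuples / no_treasure_tuples: the tuple conversion is the identity under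
  -- our encoding of a cell as List Int (equality against pairs is handled by cellInA).
  let has_treasure_tuples := has_treasure
  let no_treasure_tuples := no_treasure
  positions.foldl
    (fun filtered position =>
      if (has_treasure_tuples.all (fun cell => cellInA cell position))
          && (no_treasure_tuples.all (fun cell => !cellInA cell position)) then
        filtered ++ [position]
      else filtered)
    []

-- ===== PORT B =====
-- index.get(tuple(cell), set()): the dict is keyed by 2-tuples, so a cell list of any
-- other length names a key that can never be present — the default empty set is exact.
def lookupCell (index : PySem.Dict (Int × Int) (PySem.Set Int)) (cell : List Int) : PySem.Set Int :=
  match cell with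
  | [a, b] => index.getD (a, b) PySem.Set.empty
  | _ => PySem.Set.empty

-- `for i, position in enumerate(positions): for cell in position: index.setdefault(cell, set()).add(i)`
-- (setdefault(...).add(i) mutates the stored set in place = modify with default empty set)
def buildIndex (positions : List (List (Int × Int))) : PySem.Dict (Int × Int) (PySem.Set Int) :=
  (PySem.List.enumerate positions).foldl
    (fun d ip => ip.2.foldl (fun d c => d.modify c PySem.Set.empty (fun s => s.add ip.1)) d)
    PySem.Dict.empty

def filter_positions_alt (positions : List (List (Int × Int))) (has_treasure : List (List Int)) (no_treasure : List (List Int)) : List (List (Int × Int)) :=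
  let index := buildIndex positions
  let alive0 : PySem.Set Int := PySem.Set.ofList (PySem.List.pyRange 0 (PySem.List.len positions))
  let alive1 := has_treasure.foldl (fun alive cell => PySem.Set.inter alive (lookupCell index cell)) alive0
  let alive2 := no_treasure.foldl (fun alive cell => PySem.Set.diff alive (lookupCell index cell)) alive1
  (PySem.List.sorted alive2 (fun i => i)).map (fun i => PySem.List.pyGetD positions i [])

-- ===== PRECONDITION & SPEC =====
def Spec_filter_positions (positions : List (List (Int × Int))) (has_treasure : List (List Int)) (no_treasure : List (List Int)) (out : List (List (Int × Int))) : Prop := out = filter_positions_alt positions has_treasure no_treasure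
instance (positions : List (List (Int × Int))) (has_treasure : List (List Int)) (no_treasure : List (List Int)) (out : List (List (Int × Int))) : Decidable (Spec_filter_positions positions has_treasure no_treasure out) := by unfold Spec_filter_positions; infer_instance

-- ===== CLAIM (what is proved, stated in full; the proofs are below) =====
def Claim_equal_filter_positions : Prop := ∀ (positions : List (List (Int × Int))) (has_treasure : List (List Int)) (no_treasure : List (List Int)), Dom_filter_positions positions has_treasure no_treasure → Spec_filter_positions positions has_treasure no_treasure (filter_positions positions has_treasure no_treasure)

-- ===== LEMMAS AND PROOFS =====

-- One position's inner loop: index i is recorded at exactly the cells of that position.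
theorem mem_innerFold (pos : List (Int × Int)) (i : Int) :
    ∀ (d : PySem.Dict (Int × Int) (PySem.Set Int)) (c : Int × Int) (j : Int),
      j ∈ (pos.foldl (fun d c' => d.modify c' PySem.Set.empty (fun s => s.add i)) d).getD c PySem.Set.empty
        ↔ j ∈ d.getD c PySem.Set.empty ∨ (j = i ∧ c ∈ pos) := by
  induction pos with
  | nil => intro d c j; simp
  | cons hd tl ih =>
    intro d c j
    simp only [List.foldl_cons, ih, PySem.Dict.getD_modify]
    split_ifs with h
    · subst h
      simp only [PySem.Set.mem_add, List.mem_cons]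
      tauto
    · simp only [List.mem_cons]
      tauto

-- The whole enumerate loop: j is recorded at c iff some position (counted from s) contains c.
theorem mem_buildFold :
    ∀ (ps : List (List (Int × Int))) (s : Int) (d : PySem.Dict (Int × Int) (PySem.Set Int))
      (c : Int × Int) (j : Int),
      j ∈ ((PySem.List.enumerate ps s).foldl
            (fun d ip => ip.2.foldl (fun d c' => d.modify c' PySem.Set.empty (fun s' => s'.add ip.1)) d)
            d).getD c PySem.Set.empty
        ↔ j ∈ d.getD c PySem.Set.empty
            ∨ ∃ k : Nat, k < ps.length ∧ j = s + (k : Int) ∧ c ∈ ps.getD k [] := by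
  intro ps
  induction ps with
  | nil => intro s d c j; simp [PySem.List.enumerate]
  | cons p rest ih =>
    intro s d c j
    rw [PySem.List.enumerate_cons, List.foldl_cons, ih, mem_innerFold]
    constructor
    · rintro ((hd | ⟨hj, hc⟩) | ⟨k, hk, hj, hc⟩)
      · exact Or.inl hd
      · exact Or.inr ⟨0, by simp, by omega, by simpa using hc⟩
      · refine Or.inr ⟨k + 1, by simpa using Nat.succ_lt_succ hk, ?_, by simpa using hc⟩
        push_cast at hj ⊢
        omega
    · rintro (hd | ⟨k, hk, hj, hc⟩)
      · exact Or.inl (Or.inl hd)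
      · cases k with
        | zero => exact Or.inl (Or.inr ⟨by simpa using hj, by simpa using hc⟩)
        | succ k =>
          refine Or.inr ⟨k, by simpa using Nat.lt_of_succ_lt_succ hk, ?_, by simpa using hc⟩
          push_cast at hj ⊢
          omega

theorem mem_buildIndex (positions : List (List (Int × Int))) (c : Int × Int) (j : Int) :
    j ∈ (buildIndex positions).getD c PySem.Set.empty
      ↔ ∃ k : Nat, k < positions.length ∧ j = (k : Int) ∧ c ∈ positions.getD k [] := by
  unfold buildIndex
  rw [mem_buildFold]
  simp [PySem.Dict.getD_empty, PySem.Set.empty]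

-- The index lookup agrees with A's direct membership test, at every valid index.
theorem contains_lookupCell (positions : List (List (Int × Int))) (cell : List Int)
    (k : Nat) (hk : k < positions.length) :
    (lookupCell (buildIndex positions) cell).contains (k : Int)
      = cellInA cell (positions.getD k []) := by
  rw [Bool.eq_iff_iff, PySem.Set.contains_iff]
  match cell with
  | [] => simp [lookupCell, PySem.Set.empty, cellInA]
  | [a] => simp [lookupCell, PySem.Set.empty, cellInA]
  | a :: b :: c :: t => simp [lookupCell, PySem.Set.empty, cellInA]
  | [a, b] =>
    rw [show lookupCell (buildIndex positions) [a, b]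
        = (buildIndex positions).getD (a, b) PySem.Set.empty from rfl]
    rw [mem_buildIndex]
    constructor
    · rintro ⟨m, hm, hjm, hc⟩
      have : m = k := by exact_mod_cast hjm.symm
      subst this
      simp only [cellInA, List.any_eq_true]
      exact ⟨(a, b), hc, by simp⟩
    · intro h
      refine ⟨k, hk, rfl, ?_⟩
      simp only [cellInA, List.any_eq_true] at h
      obtain ⟨ab, hab, he⟩ := h
      have : a = ab.1 ∧ b = ab.2 := by simpa using he
      obtain ⟨h1, h2⟩ := this
      simpa [h1, h2] using hab

-- Repeated narrowing of the alive set by one cell at a time is one filter by "all cells".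
theorem foldl_filter_all {α : Type} (f : List Int → α → Bool) :
    ∀ (cells : List (List Int)) (l : List α),
      cells.foldl (fun alive c => alive.filter (f c)) l
        = l.filter (fun i => cells.all (fun c => f c i)) := by
  intro cells
  induction cells with
  | nil => intro l; simp
  | cons c cs ih =>
    intro l
    simp only [List.foldl_cons, ih, List.filter_filter, List.all_cons]
    apply List.filter_congr
    intro i _
    simp [Bool.and_comm]

-- Filtering range indices by a predicate of the indexed element, then reading the
-- elements back, is filtering the list itself.
theorem range_filter_map_getD {α : Type} (d : α) (q : α → Bool) :
    ∀ (xs : List α),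
      ((List.range xs.length).filter (fun i => q (xs.getD i d))).map (fun i => xs.getD i d)
        = xs.filter q := by
  intro xs
  induction xs with
  | nil => simp
  | cons x xs ih =>
    simp only [List.length_cons, List.range_succ_eq_map, List.filter_cons, List.getD_cons_zero]
    have hmap : ((List.range xs.length).map Nat.succ).filter
        (fun i => q ((x :: xs).getD i d))
        = ((List.range xs.length).filter (fun i => q (xs.getD i d))).map Nat.succ := by
      rw [List.filter_map]
      rfl
    by_cases hq : q x = true
    · rw [if_pos hq, List.map_cons, List.getD_cons_zero, hmap, List.map_map]
      simp only [Function.comp_def, List.getD_cons_succ, ih]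
      simp [hq]
    · rw [if_neg (by simp [hq]), hmap, List.map_map]
      simp only [Function.comp_def, List.getD_cons_succ, ih]
      simp [hq]

-- ===== VERDICT (by name: the statement is the Claim_ definition above) =====
theorem filter_positions_spec : Claim_equal_filter_positions := by
  intro positions has_treasure no_treasure _
  unfold Spec_filter_positions filter_positions filter_positions_alt
  simp only [PySem.List.foldl_append_if (f := fun p => p), List.map_id', List.nil_append]
  -- unfold the set operations into filters and fuse the two cell loops
  rw [show (fun (alive : PySem.Set Int) cell =>
        PySem.Set.inter alive (lookupCell (buildIndex positions) cell))
      = (fun alive cell => List.filter (fun x => (lookupCell (buildIndex positions) cell).contains x) alive) from rfl]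
  rw [show (fun (alive : PySem.Set Int) cell =>
        PySem.Set.diff alive (lookupCell (buildIndex positions) cell))
      = (fun alive cell => List.filter (fun x => !(lookupCell (buildIndex positions) cell).contains x) alive) from rfl]
  rw [foldl_filter_all, foldl_filter_all, List.filter_filter]
  -- alive0 is the (duplicate-free) index range
  have hlen : PySem.List.len positions = (positions.length : Int) := rfl
  rw [hlen, PySem.List.pyRange_zero_natCast,
    PySem.Set.ofList_eq_self_of_nodup _
      (List.nodup_range.map (f := fun (k : Nat) => (k : Int)) (fun a b h => by simpa using h))]
  set q : Int → Bool := fun i =>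
      (no_treasure.all fun c => !(lookupCell (buildIndex positions) c).contains i)
        && (has_treasure.all fun c => (lookupCell (buildIndex positions) c).contains i) with hq
  -- the filtered range is strictly increasing, so sorting it is the identity
  have hpair : ((List.map (fun (k : Nat) => (k : Int)) (List.range positions.length)).filter q).Pairwise
      (fun a b => a < b) := by
    refine List.Pairwise.filter _ ?_
    exact List.Pairwise.map (fun (k : Nat) => (k : Int))
      (fun a b hab => by simpa using hab) List.pairwise_lt_range
  rw [PySem.List.sorted_eq_of_perm_of_pairwise_lt _ _ _ (List.Perm.refl _) hpair]
  rw [List.filter_map, List.map_map]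
  have hcongr : ∀ k ∈ List.range positions.length,
      (q ∘ (fun k : Nat => (k : Int))) k
        = (fun p => (has_treasure.all fun cell => cellInA cell p)
            && (no_treasure.all fun cell => !cellInA cell p)) (positions.getD k []) := by
    intro k hk
    have hk' : k < positions.length := List.mem_range.mp hk
    simp only [Function.comp_def, hq]
    rw [show (fun c => !(lookupCell (buildIndex positions) c).contains (k : Int))
        = (fun c : List Int => !cellInA c (positions.getD k [])) from
      funext fun c => by rw [contains_lookupCell positions c k hk']]
    rw [show (fun c => (lookupCell (buildIndex positions) c).contains (k : Int))
        = (fun c : List Int => cellInA c (positions.getD k [])) from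
      funext fun c => by rw [contains_lookupCell positions c k hk']]
    exact Bool.and_comm _ _
  rw [List.filter_congr hcongr]
  rw [show ((fun i => PySem.List.pyGetD positions i []) ∘ (fun k : Nat => (k : Int)))
      = (fun k : Nat => positions.getD k []) from
    funext fun k => PySem.List.pyGetD_natCast positions k []]
  exact (range_filter_map_getD [] _ positions).symm
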